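-- pv_equiv track=rewrite | github.com/iGxnon/captcha-mx | model/utils.py | remove_rptch
-- ===== SOURCE A (Python) =====
-- def count_rptch(text):
--     maxch = (1, 0)
--     nowch = (0, 0)
--     lastch = None
--     for index, i in enumerate(text):
--         if lastch == i:
--             nowch = (nowch[0] + 1, nowch[1])
--             if nowch[0] > maxch[0]:
--                 maxch = nowch
--         else:
--             nowch = (1, index)
--         lastch = i
--
--     return maxch
--
-- def remove_rptch(text, tar_len=4):
--     def rmchr(text, index):
--         return text[:index] + text[index + 1:]
--
--     while len(text) > tar_len:
--         maxch = count_rptch(text)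
--         if maxch[0] <= 1:
--             break
--         text = rmchr(text, maxch[1])
--     return text
-- ===== SOURCE B (Python) =====
-- def remove_rptch(text, tar_len=4):
--     # Run-length decomposition once; repeatedly shorten the first longest run;
--     # rebuild the string once at the end (no per-step string copies/rescans).
--     runs = []
--     for ch in text:
--         if runs and runs[-1][0] == ch:
--             runs[-1][1] += 1
--         else:
--             runs.append([ch, 1])
--     total = len(text)
--     while total > tar_len:
--         best = -1
--         best_len = 0
--         for i, (c, n) in enumerate(runs):
--             if n > best_len:
--                 best = i
--                 best_len = n
--         if best < 0 or best_len <= 1: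
--             break
--         runs[best][1] -= 1
--         total -= 1
--     return ''.join(c * n for c, n in runs)
-- ===== Notes on version B (the rewrite author's own statement) =====
-- stated objective: faster
-- what changed: B run-length-encodes the text once and repeatedly decrements the first longest run in the run list, rebuilding the string once at the end, instead of rescanning and re-slicing the whole string on every removal.
import Mathlib
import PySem

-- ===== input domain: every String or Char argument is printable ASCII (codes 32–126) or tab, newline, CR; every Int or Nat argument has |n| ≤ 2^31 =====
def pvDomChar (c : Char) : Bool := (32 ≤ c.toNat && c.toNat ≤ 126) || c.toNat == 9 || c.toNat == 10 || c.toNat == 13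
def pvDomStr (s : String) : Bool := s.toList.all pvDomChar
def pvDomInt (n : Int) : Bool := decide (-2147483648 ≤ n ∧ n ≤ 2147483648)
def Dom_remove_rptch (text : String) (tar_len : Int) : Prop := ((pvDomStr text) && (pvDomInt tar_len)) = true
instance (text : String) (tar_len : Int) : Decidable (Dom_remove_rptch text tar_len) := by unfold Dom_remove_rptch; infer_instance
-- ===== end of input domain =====

-- B replaces A's per-removal full rescan and string re-slicing by one run-length
-- decomposition whose first longest run is decremented per step (objective: faster).

-- ===== PORT A =====
-- one step of count_rptch's loop; state = (maxch, nowch, lastch), A's three loop variables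
def count_step (st : (Int × Int) × (Int × Int) × Option Char) (p : Int × Char) :
    (Int × Int) × (Int × Int) × Option Char :=
  match st with
  | (maxch, nowch, lastch) =>
    if lastch = some p.2 then
      let nowch' := (nowch.1 + 1, nowch.2)
      (if nowch'.1 > maxch.1 then nowch' else maxch, nowch', some p.2)
    else (maxch, (1, p.1), some p.2)

-- count_rptch(text): fold of count_step over enumerate(text), returning maxch
def count_rptchA (cs : List Char) : Int × Int :=
  ((PySem.List.enumerate cs 0).foldl count_step ((1, 0), (0, 0), none)).1

-- rmchr: text[:index] + text[index + 1:]
def rmchr (cs : List Char) (index : Int) : List Char :=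
  PySem.List.slice cs none (some index) ++ PySem.List.slice cs (some (index + 1)) none

-- the while loop; fuel = len(text)+1 never runs out because every iteration removes one char
def remove_loop (fuel : Nat) (cs : List Char) (tar_len : Int) : List Char :=
  match fuel with
  | 0 => cs
  | fuel + 1 =>
    if (cs.length : Int) > tar_len then
      -- maxch = count_rptch(text)
      if (count_rptchA cs).1 ≤ 1 then cs
      else remove_loop fuel (rmchr cs (count_rptchA cs).2) tar_len
    else cs

def remove_rptch (text : String) (tar_len : Int) : String :=
  String.ofList (remove_loop (text.toList.length + 1) text.toList tar_len)

-- ===== PORT B =====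
-- run-length build step: Python appends at the end / mutates runs[-1]; the accumulator is
-- kept reversed (head = last run) and reversed once after the fold
def runs_build (acc : List (Char × Int)) (ch : Char) : List (Char × Int) :=
  match acc with
  | (c, n) :: rest => if c = ch then (c, n + 1) :: rest else (ch, 1) :: (c, n) :: rest
  | [] => [(ch, 1)]

-- one step of the 'for i, (c, n) in enumerate(runs)' scan; state = (best, best_len)
def best_step (st : Int × Int) (p : Int × (Char × Int)) : Int × Int :=
  if p.2.2 > st.2 then (p.1, p.2.2) else st

def best_run (rs : List (Char × Int)) : Int × Int :=
  (PySem.List.enumerate rs 0).foldl best_step (-1, 0)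

-- runs[best][1] -= 1  (best ≥ 0 whenever used: the 'best < 0' break precedes it)
def dec_at (rs : List (Char × Int)) (i : Int) : List (Char × Int) :=
  rs.modify i.toNat (fun p => (p.1, p.2 - 1))

-- the while loop; fuel = len(text)+1 never runs out because total decreases each iteration
def alt_loop (fuel : Nat) (rs : List (Char × Int)) (total tar_len : Int) : List (Char × Int) :=
  match fuel with
  | 0 => rs
  | fuel + 1 =>
    if total > tar_len then
      -- (best, best_len) = scan over enumerate(runs)
      if (best_run rs).1 < 0 ∨ (best_run rs).2 ≤ 1 then rs
      else alt_loop fuel (dec_at rs (best_run rs).1) (total - 1) tar_len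
    else rs

-- ''.join(c * n for c, n in runs)
def remove_rptch_alt (text : String) (tar_len : Int) : String :=
  String.ofList ((alt_loop (text.toList.length + 1) ((text.toList.foldl runs_build []).reverse)
    (text.toList.length : Int) tar_len).flatMap (fun p => List.replicate p.2.toNat p.1))

-- ===== PRECONDITION & SPEC =====
def Spec_remove_rptch (text : String) (tar_len : Int) (out : String) : Prop := out = remove_rptch_alt text tar_len
instance (text : String) (tar_len : Int) (out : String) : Decidable (Spec_remove_rptch text tar_len out) := by unfold Spec_remove_rptch; infer_instance

-- ===== CLAIM (what is proved, stated in full; the proofs are below) =====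
def Claim_equal_remove_rptch : Prop := ∀ (text : String) (tar_len : Int), Dom_remove_rptch text tar_len → Spec_remove_rptch text tar_len (remove_rptch text tar_len)

-- ===== LEMMAS AND PROOFS =====

-- decoding a run list back to its characters (B's final join)
def decodeRuns (rs : List (Char × Int)) : List Char :=
  rs.flatMap (fun p => List.replicate p.2.toNat p.1)

-- well-formed run list: positive lengths, adjacent runs carry distinct characters
def wfRuns (rs : List (Char × Int)) : Prop :=
  (∀ p ∈ rs, 1 ≤ p.2) ∧ (rs.map Prod.fst).IsChain (· ≠ ·)

lemma decodeRuns_append (a b : List (Char × Int)) :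
    decodeRuns (a ++ b) = decodeRuns a ++ decodeRuns b := by simp [decodeRuns]

lemma decodeRuns_cons (p : Char × Int) (l : List (Char × Int)) :
    decodeRuns (p :: l) = List.replicate p.2.toNat p.1 ++ decodeRuns l := by simp [decodeRuns]

-- what A's maxch is, computed run by run (k = text offset of the first run of rs)
def Afold : List (Char × Int) → Int → Int × Int → Int × Int
  | [], _, m => m
  | (_, n) :: rest, k, m => Afold rest (k + n) (if n > m.1 then (n, k) else m)

-- B's scan, started at run index i with state st
def bfold (rs : List (Char × Int)) (i : Int) (st : Int × Int) : Int × Int :=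
  (PySem.List.enumerate rs i).foldl best_step st

def sumLen (rs : List (Char × Int)) : Int := (rs.map Prod.snd).sum

-- A's inner fold across the tail of one run: nowch counts up, maxch records the overflow
lemma fold_run_same (m : Nat) (c : Char) : ∀ (s j k : Int) (mx : Int × Int),
    1 ≤ j → j ≤ mx.1 →
    (PySem.List.enumerate (List.replicate m c) s).foldl count_step (mx, (j, k), some c)
      = ((if j + m > mx.1 then (j + (m : Int), k) else mx), (j + (m : Int), k), some c) := by
  induction m with
  | zero =>
    intro s j k mx h1 h2
    simp [PySem.List.enumerate_nil]
    omega
  | succ m ih =>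
    intro s j k mx h1 h2
    rw [List.replicate_succ, PySem.List.enumerate_cons, List.foldl_cons]
    have hstep : count_step (mx, (j, k), some c) (s, c)
        = (if j + 1 > mx.1 then ((j + 1 : Int), k) else mx, ((j + 1 : Int), k), some c) := by
      simp [count_step]
    rw [hstep]
    by_cases h : j + 1 > mx.1
    · rw [if_pos h, ih (s+1) (j+1) k ((j+1 : Int), k) (by omega) (by simp)]
      rcases Nat.eq_zero_or_pos m with hm | hm
      · subst hm; simp; omega
      · have c1 : j + 1 + (m : Int) > j + 1 := by omega
        have c2 : j + ((m : Nat) + 1 : Nat) > mx.1 := by push_cast; omega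
        rw [if_pos c1, if_pos c2]
        have : j + 1 + (m : Int) = j + ((m : Nat) + 1 : Nat) := by push_cast; ring
        rw [this]
    · rw [if_neg h, ih (s+1) (j+1) k mx (by omega) (by omega)]
      have he : j + 1 + (m : Int) = j + ((m : Nat) + 1 : Nat) := by push_cast; ring
      rw [he]

-- A's fold across one whole run entered on a different character
lemma fold_run (n : Nat) (c : Char) (s : Int) (mx now : Int × Int) (last : Option Char)
    (hn : 1 ≤ n) (hl : last ≠ some c) (hm : 1 ≤ mx.1) :
    (PySem.List.enumerate (List.replicate n c) s).foldl count_step (mx, now, last)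
      = ((if (n : Int) > mx.1 then ((n : Int), s) else mx), ((n : Int), s), some c) := by
  obtain ⟨m, rfl⟩ : ∃ m, n = m + 1 := ⟨n - 1, by omega⟩
  rw [List.replicate_succ, PySem.List.enumerate_cons, List.foldl_cons]
  have hstep : count_step (mx, now, last) (s, c) = (mx, (1, s), some c) := by
    simp [count_step, hl]
  rw [hstep, fold_run_same m c (s+1) 1 s mx (by omega) hm]
  have he : (1 : Int) + (m : Int) = ((m + 1 : Nat) : Int) := by push_cast; ring
  rw [he]

-- A's char-level fold over a decoded run list computes Afold
lemma count_fold (rs : List (Char × Int)) : ∀ (k : Int) (mx now : Int × Int) (last : Option Char),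
    (∀ p ∈ rs, 1 ≤ p.2) → (rs.map Prod.fst).IsChain (· ≠ ·) →
    (∀ q ∈ rs.head?, last ≠ some q.1) → 1 ≤ mx.1 →
    ((PySem.List.enumerate (decodeRuns rs) k).foldl count_step (mx, now, last)).1 = Afold rs k mx := by
  induction rs with
  | nil => intro k mx now last _ _ _ _; simp [decodeRuns, Afold, PySem.List.enumerate_nil]
  | cons p rest ih =>
    obtain ⟨c, n⟩ := p
    intro k mx now last h1 hch hhead hm
    have hn : 1 ≤ n := h1 (c, n) (List.mem_cons_self)
    have hdec : decodeRuns ((c, n) :: rest) = List.replicate n.toNat c ++ decodeRuns rest := by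
      simp [decodeRuns]
    rw [hdec, PySem.List.enumerate_append, List.foldl_append]
    have hlast : last ≠ some c := hhead (c, n) (by simp)
    rw [fold_run n.toNat c k mx now last (by omega) hlast hm]
    have hcast : ((n.toNat : Nat) : Int) = n := Int.toNat_of_nonneg (by omega)
    rw [List.length_replicate, hcast]
    have hch' : (rest.map Prod.fst).IsChain (· ≠ ·) := by
      rcases (List.isChain_cons_iff _ _ _).1 hch with h | ⟨b, l', _, hbl, hl⟩
      · simp [List.map_eq_nil_iff.1 h]
      · rw [hl]; exact hbl
    have hhead' : ∀ q ∈ rest.head?, (some c : Option Char) ≠ some q.1 := by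
      intro q hq
      cases rest with
      | nil => simp at hq
      | cons r rest' =>
        simp at hq; subst hq
        rcases (List.isChain_cons_iff _ _ _).1 hch with h | ⟨b, l', hcb, _, hl⟩
        · simp at h
        · obtain ⟨hb, -⟩ := List.cons_eq_cons.mp hl
          simp
          exact hb ▸ hcb
    have hm' : 1 ≤ (if n > mx.1 then ((n : Int), k) else mx).1 := by
      split <;> omega
    rw [ih (k + n) _ ((n : Int), k) (some c) (fun q hq => h1 q (List.mem_cons_of_mem _ hq)) hch' hhead' hm']
    rfl

lemma count_eq_Afold (rs : List (Char × Int)) (h : wfRuns rs) :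
    count_rptchA (decodeRuns rs) = Afold rs 0 (1, 0) :=
  count_fold rs 0 (1, 0) (0, 0) none h.1 h.2 (by intro q _; simp) (by norm_num)

lemma bfold_cons (x : Char × Int) (xs : List (Char × Int)) (i : Int) (st : Int × Int) :
    bfold (x :: xs) i st = bfold xs (i + 1) (best_step st (i, x)) := by
  simp [bfold, PySem.List.enumerate_cons]

-- the bridge between A's maxch (length, text offset) and B's scan (run index, length):
-- equal maximal lengths, and when ≥ 2 they point at the same run
lemma link (rs : List (Char × Int)) : ∀ (k i : Int) (m st : Int × Int) (σ : Int),
    (∀ p ∈ rs, 1 ≤ p.2) → m.1 = max 1 st.2 → (2 ≤ st.2 → m = (st.2, σ)) →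
    (Afold rs k m).1 = max 1 (bfold rs i st).2 ∧
    (2 ≤ (bfold rs i st).2 →
      (bfold rs i st = st ∧ Afold rs k m = (st.2, σ)) ∨
      ∃ j : Nat, j < rs.length ∧ bfold rs i st = (i + (j : Int), rs[j]!.2) ∧
        Afold rs k m = (rs[j]!.2, k + sumLen (rs.take j))) := by
  induction rs with
  | nil =>
    intro k i m st σ _ hm h2
    refine ⟨hm, fun hb => Or.inl ⟨rfl, ?_⟩⟩
    have := h2 hb
    simp [Afold, this]
  | cons p rest ih =>
    obtain ⟨c, n⟩ := p
    intro k i m st σ h1 hm h2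
    have hn : 1 ≤ n := h1 (c, n) List.mem_cons_self
    have h1' : ∀ q ∈ rest, 1 ≤ q.2 := fun q hq => h1 q (List.mem_cons_of_mem _ hq)
    rw [bfold_cons]
    have hA : Afold ((c, n) :: rest) k m = Afold rest (k + n) (if n > m.1 then (n, k) else m) := rfl
    rw [hA]
    by_cases hcA : n > max 1 st.2
    · -- both scans pick this run
      have hst' : best_step st (i, (c, n)) = (i, n) := by simp [best_step]; omega
      have hm' : (if n > m.1 then ((n : Int), k) else m) = ((n : Int), k) := by
        rw [if_pos]; omega
      rw [hst', hm']
      obtain ⟨ihp1, ihp2⟩ := ih (k + n) (i + 1) ((n : Int), k) (i, n) k h1'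
        (by simp; omega) (by intro _; rfl)
      refine ⟨ihp1, fun hb => ?_⟩
      rcases ihp2 hb with ⟨hst, hAf⟩ | ⟨j, hj, hbf, hAf⟩
      · refine Or.inr ⟨0, by simp, ?_, ?_⟩
        · rw [hst]; simp
        · rw [hAf]; simp [sumLen]
      · refine Or.inr ⟨j + 1, by simpa using hj, ?_, ?_⟩
        · rw [hbf]; simp; ring
        · rw [hAf]; simp [sumLen]; ring
    · by_cases hcB : n > st.2
      · -- B records a first run of length 1 which A's threshold ignores
        have hn1 : n = 1 ∧ st.2 ≤ 0 := by constructor <;> omega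
        have hst' : best_step st (i, (c, n)) = (i, 1) := by
          simp only [best_step]
          rw [if_pos hcB, hn1.1]
        have hm' : (if n > m.1 then ((n : Int), k) else m) = m := by
          rw [if_neg]; omega
        rw [hst', hm']
        obtain ⟨ihp1, ihp2⟩ := ih (k + n) (i + 1) m (i, 1) σ h1'
          (by simp; omega) (by intro h; omega)
        refine ⟨ihp1, fun hb => ?_⟩
        rcases ihp2 hb with ⟨hst, hAf⟩ | ⟨j, hj, hbf, hAf⟩
        · rw [hst] at hb; simp at hb
        · refine Or.inr ⟨j + 1, by simpa using hj, ?_, ?_⟩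
          · rw [hbf]; simp; ring
          · rw [hAf]; simp [sumLen]; ring
      · -- neither scan updates
        have hst' : best_step st (i, (c, n)) = st := by rw [best_step, if_neg]; omega
        have hm' : (if n > m.1 then ((n : Int), k) else m) = m := by rw [if_neg]; omega
        rw [hst', hm']
        obtain ⟨ihp1, ihp2⟩ := ih (k + n) (i + 1) m st σ h1' hm h2
        refine ⟨ihp1, fun hb => ?_⟩
        rcases ihp2 hb with ⟨hst, hAf⟩ | ⟨j, hj, hbf, hAf⟩
        · exact Or.inl ⟨hst, hAf⟩
        · refine Or.inr ⟨j + 1, by simpa using hj, ?_, ?_⟩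
          · rw [hbf]; simp; ring
          · rw [hAf]; simp [sumLen]; ring

lemma sumLen_decode (rs : List (Char × Int)) (h : ∀ p ∈ rs, 1 ≤ p.2) :
    sumLen rs = ((decodeRuns rs).length : Int) := by
  induction rs with
  | nil => simp [sumLen, decodeRuns]
  | cons p rest ih =>
    have hp : 1 ≤ p.2 := h p List.mem_cons_self
    have := ih (fun q hq => h q (List.mem_cons_of_mem _ hq))
    simp [sumLen, decodeRuns] at this ⊢
    omega

-- removing the character at the first longest run's start offset = decrementing that run
lemma rm_decode (rs : List (Char × Int)) (j : Nat) (hj : j < rs.length)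
    (h1 : ∀ p ∈ rs, 1 ≤ p.2) (h2 : 2 ≤ rs[j]!.2) :
    rmchr (decodeRuns rs) (sumLen (rs.take j))
      = decodeRuns (rs.modify j (fun p => (p.1, p.2 - 1))) := by
  have hbang : rs[j]! = rs[j] := getElem!_pos rs j hj
  rw [hbang] at h2
  have hcs : decodeRuns rs = decodeRuns (rs.take j)
      ++ (List.replicate (rs[j].2.toNat) rs[j].1 ++ decodeRuns (rs.drop (j+1))) := by
    conv_lhs => rw [← List.take_append_drop j rs, List.drop_eq_getElem_cons hj]
    rw [decodeRuns_append, decodeRuns_cons]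
  have hL : sumLen (rs.take j) = ((decodeRuns (rs.take j)).length : Int) :=
    sumLen_decode _ (fun p hp => h1 p (List.mem_of_mem_take hp))
  have hnt : 2 ≤ rs[j].2.toNat := by omega
  have hrepl : List.replicate (rs[j].2.toNat) rs[j].1
      = rs[j].1 :: List.replicate (rs[j].2.toNat - 1) rs[j].1 := by
    rw [← List.replicate_succ]
    congr 1
    omega
  rw [rmchr, hL, PySem.List.slice_to_natCast]
  have hc1 : ((decodeRuns (rs.take j)).length : Int) + 1
      = (((decodeRuns (rs.take j)).length + 1 : Nat) : Int) := by push_cast; ring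
  rw [hc1, PySem.List.slice_from_natCast]
  rw [hcs, hrepl]
  rw [List.take_left']
  · have hassoc : decodeRuns (rs.take j) ++ (rs[j].1 :: List.replicate (rs[j].2.toNat - 1) rs[j].1
        ++ decodeRuns (rs.drop (j+1)))
        = (decodeRuns (rs.take j) ++ [rs[j].1]) ++ (List.replicate (rs[j].2.toNat - 1) rs[j].1
        ++ decodeRuns (rs.drop (j+1))) := by simp
    rw [hassoc, List.drop_left']
    · rw [List.modify_eq_take_cons_drop hj, decodeRuns_append, decodeRuns_cons]
      congr 2
      have : (rs[j].2 - 1).toNat = rs[j].2.toNat - 1 := by omega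
      rw [this]
    · simp
  · rfl

lemma wf_modify (rs : List (Char × Int)) (j : Nat) (hj : j < rs.length)
    (h : wfRuns rs) (h2 : 2 ≤ rs[j]!.2) :
    wfRuns (rs.modify j (fun p => (p.1, p.2 - 1))) := by
  rw [getElem!_pos rs j hj] at h2
  constructor
  · intro p hp
    rw [List.modify_eq_take_cons_drop hj] at hp
    rcases List.mem_append.1 hp with hm | hm
    · exact h.1 p (List.mem_of_mem_take hm)
    · rcases List.mem_cons.1 hm with rfl | hm
      · simp; omega
      · exact h.1 p (List.mem_of_mem_drop hm)
  · have hmap : (rs.modify j (fun p => (p.1, p.2 - 1))).map Prod.fst = rs.map Prod.fst := by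
      rw [List.modify_eq_take_cons_drop hj]
      simp
      conv_rhs => rw [← List.take_append_drop j (List.map Prod.fst rs),
        List.drop_eq_getElem_cons (by simpa using hj)]
      simp
    rw [hmap]
    exact h.2

lemma sumLen_modify (rs : List (Char × Int)) (j : Nat) (hj : j < rs.length) :
    sumLen (rs.modify j (fun p => (p.1, p.2 - 1))) = sumLen rs - 1 := by
  rw [List.modify_eq_take_cons_drop hj]
  simp [sumLen]
  conv_rhs => rw [← List.take_append_drop j (List.map Prod.snd rs),
    List.drop_eq_getElem_cons (by simpa using hj)]
  simp
  ring

-- B's run builder is a faithful run-length decomposition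
lemma runs_build_ok (cs : List Char) : ∀ (acc : List (Char × Int)),
    (∀ p ∈ acc, 1 ≤ p.2) → (acc.map Prod.fst).IsChain (· ≠ ·) →
    (∀ p ∈ cs.foldl runs_build acc, 1 ≤ p.2) ∧
    ((cs.foldl runs_build acc).map Prod.fst).IsChain (· ≠ ·) ∧
    decodeRuns (cs.foldl runs_build acc).reverse = decodeRuns acc.reverse ++ cs := by
  induction cs with
  | nil => intro acc h1 h2; exact ⟨h1, h2, by simp⟩
  | cons ch cs ih =>
    intro acc h1 h2
    have step : (∀ p ∈ runs_build acc ch, 1 ≤ p.2) ∧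
        ((runs_build acc ch).map Prod.fst).IsChain (· ≠ ·) ∧
        decodeRuns (runs_build acc ch).reverse = decodeRuns acc.reverse ++ [ch] := by
      match acc with
      | [] =>
        refine ⟨by simp [runs_build], by simp [runs_build], ?_⟩
        simp [runs_build, decodeRuns]
      | (c, n) :: rest =>
        have hn : 1 ≤ n := h1 (c, n) List.mem_cons_self
        by_cases hc : c = ch
        · have hrb : runs_build ((c, n) :: rest) ch = (c, n + 1) :: rest := by
            simp [runs_build, hc]
          refine ⟨?_, ?_, ?_⟩
          · intro p hp
            rw [hrb] at hp
            rcases List.mem_cons.1 hp with rfl | hp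
            · simp; omega
            · exact h1 p (List.mem_cons_of_mem _ hp)
          · rw [hrb]; simpa using h2
          · rw [hrb]
            have e1 : ((c, n + 1) :: rest).reverse = rest.reverse ++ [(c, n + 1)] := by simp
            have e2 : ((c, n) :: rest).reverse = rest.reverse ++ [(c, n)] := by simp
            rw [e1, e2, decodeRuns_append, decodeRuns_append]
            have e3 : (n + 1).toNat = n.toNat + 1 := by omega
            simp [decodeRuns, e3, List.replicate_succ']
            exact hc
        · have hrb : runs_build ((c, n) :: rest) ch = (ch, 1) :: (c, n) :: rest := by
            simp [runs_build, hc]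
          refine ⟨?_, ?_, ?_⟩
          · intro p hp
            rw [hrb] at hp
            rcases List.mem_cons.1 hp with rfl | hp
            · simp
            · exact h1 p hp
          · rw [hrb]
            simp only [List.map_cons]
            exact (List.isChain_cons_iff _ _ _).2 (Or.inr ⟨c, rest.map Prod.fst,
              fun h => hc h.symm, h2, rfl⟩)
          · rw [hrb]
            have e1 : ((ch, 1) :: (c, n) :: rest).reverse
                = ((c, n) :: rest).reverse ++ [(ch, 1)] := by simp
            rw [e1, decodeRuns_append]
            simp [decodeRuns]
    obtain ⟨s1, s2, s3⟩ := step
    obtain ⟨r1, r2, r3⟩ := ih (runs_build acc ch) s1 s2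
    refine ⟨r1, r2, ?_⟩
    rw [List.foldl_cons, r3, s3]
    simp

-- the two while loops in lock step: A over the text, B over its run list
lemma loop_eq : ∀ (fuel : Nat) (rs : List (Char × Int)) (total tar_len : Int),
    wfRuns rs → total = ((decodeRuns rs).length : Int) → (decodeRuns rs).length + 1 ≤ fuel →
    remove_loop fuel (decodeRuns rs) tar_len = decodeRuns (alt_loop fuel rs total tar_len) := by
  intro fuel
  induction fuel with
  | zero => intro rs total tar_len _ _ _; rfl
  | succ fuel ih =>
    intro rs total tar_len hwf htot hfuel
    rw [remove_loop, alt_loop, ← htot]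
    by_cases hcond : total > tar_len
    · rw [if_pos hcond, if_pos hcond]
      have hb : best_run rs = bfold rs 0 (-1, 0) := rfl
      have hcount : count_rptchA (decodeRuns rs) = Afold rs 0 (1, 0) := count_eq_Afold rs hwf
      obtain ⟨hP1, hP2⟩ := link rs 0 0 (1, 0) (-1, 0) 0 hwf.1 (by simp) (by intro h; omega)
      rw [← hb] at hP1 hP2
      by_cases hbig : 2 ≤ (best_run rs).2
      · -- neither side breaks: both decrement the same run
        rcases hP2 hbig with ⟨hst, _⟩ | ⟨j, hj, hbf, hAf⟩
        · rw [hst] at hbig; simp at hbig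
        · have hj2 : 2 ≤ rs[j]!.2 := by
            have h := hbig; rw [hbf] at h; simpa using h
          have hnb_b : ¬((best_run rs).1 < 0 ∨ (best_run rs).2 ≤ 1) := by
            rw [hbf]
            rintro (h | h)
            · simp at h; omega
            · have h2 := hj2; simp at h h2; omega
          have hnb_a : ¬(count_rptchA (decodeRuns rs)).1 ≤ 1 := by
            rw [hcount]; omega
          rw [if_neg hnb_a, if_neg hnb_b]
          have hrm : rmchr (decodeRuns rs) (count_rptchA (decodeRuns rs)).2
              = decodeRuns (rs.modify j (fun p => (p.1, p.2 - 1))) := by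
            rw [hcount, hAf]
            simp only [zero_add]
            exact rm_decode rs j hj hwf.1 hj2
          have hdec : dec_at rs (best_run rs).1 = rs.modify j (fun p => (p.1, p.2 - 1)) := by
            rw [hbf, dec_at]
            congr 1
            omega
          rw [hrm, hdec]
          have hwf' := wf_modify rs j hj hwf hj2
          have hlen : sumLen (rs.modify j (fun p => (p.1, p.2 - 1))) = sumLen rs - 1 :=
            sumLen_modify rs j hj
          have hsd := sumLen_decode rs hwf.1
          have hsd' := sumLen_decode _ hwf'.1
          exact ih (rs.modify j (fun p => (p.1, p.2 - 1))) (total - 1) tar_len hwf'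
            (by omega) (by omega)
      · -- both sides break
        have hA1 : (count_rptchA (decodeRuns rs)).1 ≤ 1 := by rw [hcount]; omega
        rw [if_pos hA1, if_pos (Or.inr (by omega))]
    · rw [if_neg hcond, if_neg hcond]

theorem main_eq (text : String) (tar_len : Int) :
    remove_rptch text tar_len = remove_rptch_alt text tar_len := by
  obtain ⟨h1, h2, h3⟩ := runs_build_ok text.toList [] (by simp) (by simp)
  have h3' : decodeRuns ((text.toList.foldl runs_build []).reverse) = text.toList := by
    simpa [decodeRuns] using h3
  have hwf : wfRuns ((text.toList.foldl runs_build []).reverse) := by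
    refine ⟨fun p hp => h1 p (List.mem_reverse.1 hp), ?_⟩
    have hmr : ((text.toList.foldl runs_build []).reverse.map Prod.fst)
        = ((text.toList.foldl runs_build []).map Prod.fst).reverse := by
      simp
    rw [hmr]
    exact List.isChain_reverse.2 (h2.imp fun _ _ hab => Ne.symm hab)
  have hloop := loop_eq (text.toList.length + 1) ((text.toList.foldl runs_build []).reverse)
    (text.toList.length : Int) tar_len hwf (by rw [h3']) (by rw [h3'])
  rw [h3'] at hloop
  show String.ofList (remove_loop (text.toList.length + 1) text.toList tar_len) = _
  rw [hloop]
  rfl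

-- ===== VERDICT (by name: the statement is the Claim_ definition above) =====
theorem remove_rptch_spec : Claim_equal_remove_rptch :=
  fun text tar_len _ => main_eq text tar_len
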